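-- pv_equiv track=rewrite | github.com/DDD-Enterprises/taskX | src/dopetask/manifest/manifest.py | _redact_tokens
-- ===== SOURCE A (Python) =====
-- REDACTED_VALUE = "[REDACTED]"
--
-- _SENSITIVE_KEYS = {
--     "access_token",
--     "api_key",
--     "apikey",
--     "auth_token",
--     "bearer",
--     "client_secret",
--     "password",
--     "passphrase",
--     "private_key",
--     "secret",
--     "session_token",
--     "token",
-- }
--
-- _SENSITIVE_SUFFIXES = (
--     "_token",
--     "_secret",
--     "_password",
--     "_passphrase",
--     "_api_key",
--     "_apikey",
--     "_private_key",
-- )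
--
-- def _is_sensitive_key(key: str) -> bool:
--     normalized = key.strip().lstrip("-").lower().replace("-", "_")
--     if normalized in _SENSITIVE_KEYS:
--         return True
--     return normalized.endswith(_SENSITIVE_SUFFIXES)
--
-- def _redact_tokens(tokens: list[str]) -> list[str]:
--     redacted: list[str] = []
--     idx = 0
--
--     while idx < len(tokens):
--         token = tokens[idx]
--
--         if token.startswith("--") and "=" in token:
--             flag, value = token.split("=", 1)
--             if _is_sensitive_key(flag):
--                 redacted.append(f"{flag}={REDACTED_VALUE}")
--             else:
--                 redacted.append(_redact_token_assignment(token, default_value=value))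
--             idx += 1
--             continue
--
--         if token.startswith("--") and _is_sensitive_key(token):
--             redacted.append(token)
--             if idx + 1 < len(tokens):
--                 redacted.append(REDACTED_VALUE)
--                 idx += 2
--             else:
--                 idx += 1
--             continue
--
--         redacted.append(_redact_token_assignment(token))
--         idx += 1
--
--     return redacted
--
-- def _redact_token_assignment(token: str, default_value: str | None = None) -> str:
--     if "=" not in token:
--         return token
--
--     key, value = token.split("=", 1)
--     if _is_sensitive_key(key):
--         return f"{key}={REDACTED_VALUE}"
--
--     if default_value is not None and _is_sensitive_key(value):
--         return f"{key}={REDACTED_VALUE}"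
--     return token
-- ===== SOURCE B (Python) =====
-- REDACTED_VALUE = "[REDACTED]"
--
-- _SENSITIVE_KEYS = {
--     "access_token", "api_key", "apikey", "auth_token", "bearer",
--     "client_secret", "password", "passphrase", "private_key",
--     "secret", "session_token", "token",
-- }
--
-- _SENSITIVE_SUFFIXES = (
--     "_token", "_secret", "_password", "_passphrase",
--     "_api_key", "_apikey", "_private_key",
-- )
--
-- def _is_sensitive_key(key: str) -> bool:
--     normalized = key.strip().lstrip("-").lower().replace("-", "_")
--     return normalized in _SENSITIVE_KEYS or normalized.endswith(_SENSITIVE_SUFFIXES)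
--
-- def _redact_token_assignment(token: str, default_value: str | None = None) -> str:
--     if "=" not in token:
--         return token
--     key, value = token.split("=", 1)
--     if _is_sensitive_key(key):
--         return f"{key}={REDACTED_VALUE}"
--     if default_value is not None and _is_sensitive_key(value):
--         return f"{key}={REDACTED_VALUE}"
--     return token
--
-- def _redact_one(token: str) -> str:
--     # Per-token redaction; a bare flag has no "=" and passes through unchanged,
--     # which also covers the sensitive bare flag itself.
--     if token.startswith("--") and "=" in token:
--         return _redact_token_assignment(token, default_value=token.split("=", 1)[1])
--     return _redact_token_assignment(token)
--
-- def _redact_tokens(tokens: list[str]) -> list[str]: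
--     # Staged design: first CLASSIFY which positions are the consumed value of a
--     # preceding bare sensitive flag (a scan over the tokens), then MAP each
--     # position independently: consumed positions become REDACTED_VALUE, all
--     # others go through the uniform per-token redactor _redact_one.
--     consumed: list[bool] = []
--     prev = False
--     for t in tokens:
--         consumed.append(prev)
--         prev = (not prev) and t.startswith("--") and "=" not in t and _is_sensitive_key(t)
--     return [REDACTED_VALUE if c else _redact_one(t) for t, c in zip(tokens, consumed)]
-- ===== Notes on version B (the rewrite author's own statement) =====
-- stated objective: alternative
-- what changed: Replaces A's single stateful while-loop with idx+=1/idx+=2 look-ahead stepping by a staged design: one scan classifies which positions are consumed values of a bare sensitive flag, then an independent per-position map emits REDACTED or the result of a uniform per-token redactor that subsumes A's separate --key=value branch.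
import Mathlib
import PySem

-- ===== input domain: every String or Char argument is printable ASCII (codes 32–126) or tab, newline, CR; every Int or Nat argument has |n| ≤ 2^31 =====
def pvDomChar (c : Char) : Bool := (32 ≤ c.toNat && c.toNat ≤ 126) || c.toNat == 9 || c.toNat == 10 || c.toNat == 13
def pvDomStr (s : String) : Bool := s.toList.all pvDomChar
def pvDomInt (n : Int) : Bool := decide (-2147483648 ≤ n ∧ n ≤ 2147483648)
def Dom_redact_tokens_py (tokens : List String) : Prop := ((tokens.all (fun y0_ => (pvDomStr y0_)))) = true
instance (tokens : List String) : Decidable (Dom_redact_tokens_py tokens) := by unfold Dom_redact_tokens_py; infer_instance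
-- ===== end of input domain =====

-- B replaces A's stateful index loop (idx += 2 look-ahead) by a staged design:
-- a classification scan marking consumed value positions, then an independent
-- per-position map through one uniform per-token redactor; objective: alternative.

-- ===== PORT A =====
-- shared module-level helpers (both Python versions use the same module helpers)
def pvRedactedValue : String := "[REDACTED]"

def pvSensitiveKeys : List String :=
  ["access_token", "api_key", "apikey", "auth_token", "bearer", "client_secret",
   "password", "passphrase", "private_key", "secret", "session_token", "token"]

def pvSensitiveSuffixes : List String :=
  ["_token", "_secret", "_password", "_passphrase", "_api_key", "_apikey", "_private_key"]

-- key.strip().lstrip("-").lower().replace("-", "_"); lstrip("-") has no PySem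
-- primitive and is ported by hand as dropWhile (· == '-') on the chars — exact,
-- since Python's str.lstrip(chars) drops exactly the leading chars in the set.
def pvIsSensitiveKey (key : String) : Bool :=
  let normalized :=
    PySem.Str.replace
      (PySem.Str.lower (String.ofList ((PySem.Str.strip key).toList.dropWhile (fun c => c == '-'))))
      "-" "_"
  if pvSensitiveKeys.contains normalized then true
  else pvSensitiveSuffixes.any (fun suf => PySem.Str.endswith normalized suf)

-- token.split("=", 1); only evaluated under '"=" in token', where it yields two parts
def pvSplitEq1 (token : String) : String × String :=
  match PySem.Str.splitMax? token "=" 1 with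
  | some (k :: v :: _) => (k, v)
  | _ => (token, "")

def pvRedactTokenAssignment (token : String) (default_value : Option String) : String :=
  if ¬ (PySem.Str.isIn "=" token) then token
  else
    if pvIsSensitiveKey (pvSplitEq1 token).1 then (pvSplitEq1 token).1 ++ "=" ++ pvRedactedValue
    else if default_value.isSome && pvIsSensitiveKey (pvSplitEq1 token).2 then
      (pvSplitEq1 token).1 ++ "=" ++ pvRedactedValue
    else token

-- A's while loop over idx, with idx += 1 / idx += 2 steps
def redactTokensGo (tokens : List String) (idx : Nat) (redacted : List String) : List String :=
  if h : idx < tokens.length then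
    let token := tokens[idx]
    if PySem.Str.startswith token "--" && PySem.Str.isIn "=" token then
      if pvIsSensitiveKey (pvSplitEq1 token).1 then
        redactTokensGo tokens (idx + 1) (redacted ++ [(pvSplitEq1 token).1 ++ "=" ++ pvRedactedValue])
      else
        redactTokensGo tokens (idx + 1) (redacted ++ [pvRedactTokenAssignment token (some (pvSplitEq1 token).2)])
    else if PySem.Str.startswith token "--" && pvIsSensitiveKey token then
      if idx + 1 < tokens.length then
        redactTokensGo tokens (idx + 2) (redacted ++ [token, pvRedactedValue])
      else
        redactTokensGo tokens (idx + 1) (redacted ++ [token])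
    else
      redactTokensGo tokens (idx + 1) (redacted ++ [pvRedactTokenAssignment token none])
  else redacted
termination_by tokens.length - idx

def redact_tokens_py (tokens : List String) : List String :=
  redactTokensGo tokens 0 []

-- ===== PORT B =====
-- the uniform per-token redactor _redact_one
def pvRedactOne (token : String) : String :=
  if PySem.Str.startswith token "--" && PySem.Str.isIn "=" token then
    pvRedactTokenAssignment token (some (pvSplitEq1 token).2)
  else pvRedactTokenAssignment token none

-- classification scan: state = (consumed flags so far, is-next-token-consumed)
def pvConsumedStep (st : List Bool × Bool) (t : String) : List Bool × Bool :=
  (st.1 ++ [st.2],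
   !st.2 && PySem.Str.startswith t "--" && !(PySem.Str.isIn "=" t) && pvIsSensitiveKey t)

def redact_tokens_py_alt (tokens : List String) : List String :=
  let consumed := (tokens.foldl pvConsumedStep ([], false)).1
  (tokens.zip consumed).map (fun p => if p.2 then pvRedactedValue else pvRedactOne p.1)

-- ===== PRECONDITION & SPEC =====
def Spec_redact_tokens_py (tokens : List String) (out : List String) : Prop := out = redact_tokens_py_alt tokens
instance (tokens : List String) (out : List String) : Decidable (Spec_redact_tokens_py tokens out) := by unfold Spec_redact_tokens_py; infer_instance

-- ===== CLAIM (what is proved, stated in full; the proofs are below) =====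
def Claim_equal_redact_tokens_py : Prop := ∀ (tokens : List String), Dom_redact_tokens_py tokens → Spec_redact_tokens_py tokens (redact_tokens_py tokens)

-- ===== LEMMAS AND PROOFS =====

-- reference recursion both programs are reduced to
def pvF (prev : Bool) : List String → List String
  | [] => []
  | t :: r =>
      (if prev then pvRedactedValue else pvRedactOne t)
        :: pvF (!prev && PySem.Str.startswith t "--" && !(PySem.Str.isIn "=" t) && pvIsSensitiveKey t) r

def pvConsumedList (prev : Bool) : List String → List Bool
  | [] => []
  | t :: r =>
      prev :: pvConsumedList (!prev && PySem.Str.startswith t "--" && !(PySem.Str.isIn "=" t) && pvIsSensitiveKey t) r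

theorem pvFoldl_consumed (l : List String) :
    ∀ (acc : List Bool) (prev : Bool),
      (l.foldl pvConsumedStep (acc, prev)).1 = acc ++ pvConsumedList prev l := by
  induction l with
  | nil => intro acc prev; simp [pvConsumedList]
  | cons t r ih =>
      intro acc prev
      simp only [List.foldl_cons, pvConsumedStep, pvConsumedList, ih]
      simp

theorem pvZipMap_eq_pvF (l : List String) :
    ∀ (prev : Bool),
      ((l.zip (pvConsumedList prev l)).map
        (fun p => if p.2 then pvRedactedValue else pvRedactOne p.1)) = pvF prev l := by
  induction l with
  | nil => intro prev; simp [pvConsumedList, pvF]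
  | cons t r ih => intro prev; simp [pvConsumedList, pvF, ih]

theorem alt_eq_pvF (tokens : List String) : redact_tokens_py_alt tokens = pvF false tokens := by
  unfold redact_tokens_py_alt
  rw [pvFoldl_consumed tokens [] false]
  simpa using pvZipMap_eq_pvF tokens false

-- A's index loop from position idx equals pvF (cleared state) on the suffix
theorem redactTokensGo_eq_pvF (tokens : List String) :
    ∀ (n idx : Nat) (redacted : List String), tokens.length - idx ≤ n →
      redactTokensGo tokens idx redacted = redacted ++ pvF false (tokens.drop idx) := by
  intro n
  induction n with
  | zero =>
      intro idx redacted hle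
      have h : ¬ idx < tokens.length := by omega
      rw [redactTokensGo, dif_neg h, List.drop_eq_nil_of_le (by omega)]
      simp [pvF]
  | succ n ih =>
      intro idx redacted hle
      by_cases h : idx < tokens.length
      · rw [redactTokensGo, dif_pos h, List.drop_eq_getElem_cons h]
        by_cases h1 : (PySem.Str.startswith tokens[idx] "--" && PySem.Str.isIn "=" tokens[idx]) = true
        · obtain ⟨hsw, hin⟩ := Bool.and_eq_true_iff.mp h1
          rw [if_pos h1]
          by_cases h2 : pvIsSensitiveKey (pvSplitEq1 tokens[idx]).1 = true
          · rw [if_pos h2, ih (idx + 1) _ (by omega)]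
            simp at hsw hin
            simp [pvF, pvRedactOne, pvRedactTokenAssignment, hsw, hin, h2]
          · rw [if_neg h2, ih (idx + 1) _ (by omega)]
            simp at hsw hin
            simp [pvF, pvRedactOne, hsw, hin]
        · rw [if_neg h1]
          by_cases h2 : (PySem.Str.startswith tokens[idx] "--" && pvIsSensitiveKey tokens[idx]) = true
          · obtain ⟨hsw, hsens⟩ := Bool.and_eq_true_iff.mp h2
            have hnin : PySem.Str.isIn "=" tokens[idx] = false := by
              cases hb : PySem.Str.isIn "=" tokens[idx]
              · rfl
              · exact absurd (by simp only [hsw, hb, Bool.and_self]) h1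
            rw [if_pos h2]
            by_cases h3 : idx + 1 < tokens.length
            · rw [if_pos h3, ih (idx + 2) _ (by omega), List.drop_eq_getElem_cons h3]
              simp at hsw hnin hsens
              simp [pvF, pvRedactOne, pvRedactTokenAssignment, hsw, hnin, hsens]
            · rw [if_neg h3, ih (idx + 1) _ (by omega),
                  List.drop_eq_nil_of_le (show tokens.length ≤ idx + 1 by omega)]
              simp at hsw hnin hsens
              simp [pvF, pvRedactOne, pvRedactTokenAssignment, hsw, hnin]
          · have hbare :
                (PySem.Str.startswith tokens[idx] "--" && !(PySem.Str.isIn "=" tokens[idx])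
                  && pvIsSensitiveKey tokens[idx]) = false := by
              cases hsw : PySem.Str.startswith tokens[idx] "--"
              · rfl
              · cases hs : pvIsSensitiveKey tokens[idx]
                · cases PySem.Str.isIn "=" tokens[idx] <;> rfl
                · exact absurd (by simp only [hsw, hs, Bool.and_self]) h2
            have hro : pvRedactOne tokens[idx] = pvRedactTokenAssignment tokens[idx] none := by
              unfold pvRedactOne
              rw [if_neg h1]
            rw [if_neg h2, ih (idx + 1) _ (by omega)]
            simp only [pvF, Bool.not_false, Bool.true_and]
            rw [hbare, hro]
            simp
      · rw [redactTokensGo, dif_neg h, List.drop_eq_nil_of_le (by omega)]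
        simp [pvF]

-- ===== VERDICT (by name: the statement is the Claim_ definition above) =====
theorem redact_tokens_py_spec : Claim_equal_redact_tokens_py := by
  intro tokens _
  unfold Spec_redact_tokens_py redact_tokens_py
  rw [alt_eq_pvF]
  simpa using redactTokensGo_eq_pvF tokens tokens.length 0 [] (by omega)
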